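-- pv_equiv track=rewrite | github.com/nmalkam/Performance_Lab | task1/task1.py | circular_array
-- ===== SOURCE A (Python) =====
-- def circular_array(n: int, m: int) -> int | str:
--
--     c_array = []
--     intervals = []
--     part_interval = [0]
--     res = ''
--     pointer = 1
--
--     for element in range(1, n + 1):
--         c_array.append(element)
--
--     while part_interval[-1] != 1:
--         part_interval = []
--         pointer -= 1
--         for num in range(1, m + 1):
--             part_interval.append(c_array[pointer])
--             pointer += 1
--             if pointer == n:
--                 pointer = 0
--         intervals.append(part_interval)
--
--     for _ in intervals:
--         res += str(_[0])
--     return res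
-- ===== SOURCE B (Python) =====
-- def circular_array(n: int, m: int) -> int | str:
--     # Track only the start index of each interval via the modular
--     # recurrence s' = (s + m - 1) % n; no array, no inner m-step walk.
--     step = (m - 1) % n
--     out = []
--     s = 0
--     while True:
--         out.append(str(s + 1))
--         if (s + step) % n == 0:
--             return ''.join(out)
--         s = (s + step) % n
-- ===== Notes on version B (the rewrite author's own statement) =====
-- stated objective: faster
-- what changed: B drops the c_array and the inner m-step pointer walk entirely: it tracks only each interval's start index via the modular recurrence s' = (s + m - 1) % n, emitting str(s + 1) per interval and stopping when the interval's last index wraps to 0.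
import Mathlib
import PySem

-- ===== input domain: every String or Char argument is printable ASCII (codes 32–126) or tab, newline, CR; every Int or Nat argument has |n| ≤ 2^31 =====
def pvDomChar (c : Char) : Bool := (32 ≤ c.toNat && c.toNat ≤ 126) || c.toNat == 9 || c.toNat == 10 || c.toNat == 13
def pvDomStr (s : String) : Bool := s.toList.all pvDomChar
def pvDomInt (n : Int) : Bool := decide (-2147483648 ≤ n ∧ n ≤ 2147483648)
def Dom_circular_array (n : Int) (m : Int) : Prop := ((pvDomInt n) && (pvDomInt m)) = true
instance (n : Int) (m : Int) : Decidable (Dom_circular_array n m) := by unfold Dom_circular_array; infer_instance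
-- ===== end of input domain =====

-- B replaces A's simulation of every interval element (O(intervals·m)) by the modular
-- recurrence s' = (s + m - 1) % n on interval-start indices only (O(intervals)).

-- ===== PORT A =====
-- one step of the inner 'for num in range(1, m+1)' loop: append c_array[pointer]; pointer += 1; wrap at n
def pvInnerStep (c : List Int) (n : Int) : (List Int × Int) → (List Int × Int)
  | (part, p) =>
    let part := part ++ [PySem.List.pyGetD c p 0]
    let p := p + 1
    if p = n then (part, 0) else (part, p)

-- the 'while part_interval[-1] != 1' loop, with fuel as totality guard (n+1 iterations
-- always suffice: the start index returns to 0 after at most n intervals)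
def pvWhileA (c : List Int) (n m : Int) : Nat → List (List Int) → List Int → Int → List (List Int)
  | 0, ivs, _, _ => ivs
  | Nat.succ f, ivs, part, p =>
    if PySem.List.pyGetD part (-1) (0 : Int) ≠ 1 then
      let st := (PySem.List.pyRange 1 (m + 1) 1).foldl (fun st _ => pvInnerStep c n st) (([] : List Int), p - 1)
      pvWhileA c n m f (ivs ++ [st.1]) st.1 st.2
    else ivs

def circular_array (n : Int) (m : Int) : String :=
  let c := PySem.List.pyRange 1 (n + 1) 1               -- c_array = [1, …, n]
  let intervals := pvWhileA c n m (n.toNat + 1) [] [0] 1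
  intervals.foldl (fun r iv => r ++ PySem.Int.toStr (PySem.List.pyGetD iv 0 0)) ""

-- ===== PORT B =====
-- Source B's 'while True' loop (fuel as totality guard, same bound as A's)
def pvLoopB (n step : Int) : Nat → Int → List String → List String
  | 0, _, out => out
  | Nat.succ f, s, out =>
    let out := out ++ [PySem.Int.toStr (s + 1)]
    if PySem.Int.mod (s + step) n = 0 then out
    else pvLoopB n step f (PySem.Int.mod (s + step) n) out

def circular_array_alt (n : Int) (m : Int) : String :=
  let step := PySem.Int.mod (m - 1) n
  PySem.Str.join "" (pvLoopB n step (n.natAbs + 1) 0 [])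

-- ===== PRECONDITION & SPEC =====
-- Pre_ excludes exactly the inputs n ≤ 0 or m ≤ 0, on which A raises IndexError
-- (empty c_array, or an empty part_interval indexed with [-1]).
def Pre_circular_array (n : Int) (m : Int) : Prop := 1 ≤ n ∧ 1 ≤ m
instance (n : Int) (m : Int) : Decidable (Pre_circular_array n m) := by unfold Pre_circular_array; infer_instance

def pvWitness_circular_array : Int × Int := (3, 2)

def Spec_circular_array (n : Int) (m : Int) (out : String) : Prop := out = circular_array_alt n m
instance (n : Int) (m : Int) (out : String) : Decidable (Spec_circular_array n m out) := by unfold Spec_circular_array; infer_instance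

-- ===== CLAIM (what is proved, stated in full; the proofs are below) =====
def Claim_equal_circular_array : Prop := ∀ (n : Int) (m : Int), Dom_circular_array n m → Pre_circular_array n m → Spec_circular_array n m (circular_array n m)

-- ===== LEMMAS AND PROOFS =====

-- a fold whose step ignores the list element is an iterate of the step
lemma pv_foldl_const_iterate {α β : Type} (g : α → α) (l : List β) (st : α) :
    l.foldl (fun st _ => g st) st = g^[l.length] st := by
  induction l generalizing st with
  | nil => rfl
  | cons x t ih => simpa [Function.iterate_succ_apply] using ih (g st)

-- reading c_array at index p (-1 allowed: Python negative indexing) is (p % n) + 1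
lemma pv_get_c (n p : Int) (hn : 1 ≤ n) (hp : -1 ≤ p) (hp2 : p < n) :
    PySem.List.pyGetD (PySem.List.pyRange 1 (n + 1) 1) p 0 = p % n + 1 := by
  rcases lt_or_ge p 0 with h | h
  · have hp1 : p = -1 := by omega
    subst hp1
    rw [show (n + 1 : Int) = (n - 1) + 1 + 1 by ring,
      PySem.List.pyRange_one_succ_right (by omega),
      PySem.List.pyGetD_neg_one_append_singleton]
    have hmod : (-1 : Int) % n = n - 1 := by
      have h1 : (-1 + n * 1) % n = (-1 : Int) % n := Int.add_mul_emod_self_left (-1) n 1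
      have h2 : (-1 + n * 1 : Int) = n - 1 := by ring
      rw [h2] at h1
      rw [← h1, Int.emod_eq_of_lt (by omega) (by omega)]
    omega
  · rw [PySem.List.pyGetD_eq_getElem _ 0 h (by rw [PySem.List.length_pyRange_one]; omega)]
    rw [PySem.List.getElem_pyRange_one]
    rw [Int.emod_eq_of_lt h hp2]
    omega

-- the inner loop, iterated j+1 times from pointer p, appends the j+1 wrapped values
-- (p % n)+1, (p+1 % n)+1, … and leaves the pointer at (p+j+1) % n
lemma pv_inner_iter (n : Int) (hn : 1 ≤ n) (j : Nat) :
    ∀ (p : Int) (part : List Int), -1 ≤ p → p < n →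
    (pvInnerStep (PySem.List.pyRange 1 (n + 1) 1) n)^[j + 1] (part, p) =
      (part ++ (List.range (j + 1)).map (fun (i : Nat) => (p + (i : Int)) % n + 1),
       (p + ((j : Int) + 1)) % n) := by
  induction j with
  | zero =>
    intro p part hp hp2
    have h1 : (pvInnerStep (PySem.List.pyRange 1 (n + 1) 1) n)^[0 + 1] (part, p)
        = pvInnerStep (PySem.List.pyRange 1 (n + 1) 1) n (part, p) := rfl
    rw [h1]
    simp only [pvInnerStep, pv_get_c n p hn hp hp2]
    have hpm : (if p + 1 = n then (0 : Int) else p + 1) = (p + 1) % n := by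
      split_ifs with h
      · rw [h, Int.emod_self]
      · exact (Int.emod_eq_of_lt (by omega) (by omega)).symm
    simp only [List.range_one, List.map_cons, List.map_nil, Nat.cast_zero, zero_add, add_zero]
    rw [← hpm]
    split_ifs <;> rfl
  | succ j ih =>
    intro p part hp hp2
    rw [Function.iterate_succ_apply]
    have hstep : pvInnerStep (PySem.List.pyRange 1 (n + 1) 1) n (part, p) =
        (part ++ [p % n + 1], (p + 1) % n) := by
      simp only [pvInnerStep, pv_get_c n p hn hp hp2]
      have hpm : (if p + 1 = n then (0 : Int) else p + 1) = (p + 1) % n := by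
        split_ifs with h
        · rw [h, Int.emod_self]
        · exact (Int.emod_eq_of_lt (by omega) (by omega)).symm
      rw [← hpm]
      split_ifs <;> rfl
    rw [hstep, ih ((p + 1) % n) _ (by have := Int.emod_nonneg (p + 1) (show n ≠ 0 by omega); omega)
      (Int.emod_lt_of_pos _ (by omega))]
    simp only [Prod.mk.injEq]
    refine ⟨?_, ?_⟩
    · rw [List.append_assoc]
      congr 1
      rw [List.range_succ_eq_map (n := j + 1), List.map_cons, List.map_map]
      simp only [List.singleton_append, List.cons.injEq]
      constructor
      · simp
      · apply List.map_congr_left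
        intro i _
        simp only [Function.comp_apply, Nat.succ_eq_add_one]
        have : ((p + 1) % n + (i : Int)) % n = (p + 1 + (i : Int)) % n :=
          Int.emod_add_emod (p + 1) n i
        rw [this]
        congr 2
        push_cast; ring
    · have : ((p + 1) % n + ((j : Int) + 1)) % n = (p + 1 + ((j : Int) + 1)) % n :=
        Int.emod_add_emod (p + 1) n ((j : Int) + 1)
      rw [this]
      congr 1
      push_cast; ring

-- abbreviation used only in proofs: the string A extracts from one interval
def pvHeadStr (iv : List Int) : String := PySem.Int.toStr (PySem.List.pyGetD iv 0 0)

-- the interval A builds in one while-iteration entered with pointer value p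
lemma pv_interval_shape (n m : Int) (hn : 1 ≤ n) (hm : 1 ≤ m) (p : Int)
    (hp : -1 ≤ p - 1) (hp2 : p - 1 < n) :
    (PySem.List.pyRange 1 (m + 1) 1).foldl
        (fun st _ => pvInnerStep (PySem.List.pyRange 1 (n + 1) 1) n st) (([] : List Int), p - 1) =
      ((List.range m.toNat).map (fun (i : Nat) => (p - 1 + (i : Int)) % n + 1),
       (p - 1 + m) % n) := by
  rw [pv_foldl_const_iterate]
  have hlen : (PySem.List.pyRange 1 (m + 1) 1).length = m.toNat := by
    rw [PySem.List.length_pyRange_one]; omega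
  obtain ⟨j, hj⟩ : ∃ j : Nat, m.toNat = j + 1 := ⟨m.toNat - 1, by omega⟩
  rw [hlen, hj, pv_inner_iter n hn j (p - 1) [] hp hp2]
  have hcast : ((j : Int) + 1) = m := by
    have : ((j + 1 : Nat) : Int) = m := by rw [← hj]; omega
    push_cast at this; omega
  simp [hcast]

-- main loop correspondence: the head-strings of A's remaining intervals are exactly
-- what B's loop appends, at every fuel
lemma pv_while_eq_loop (n m : Int) (hn : 1 ≤ n) (hm : 1 ≤ m) :
    ∀ (f : Nat) (p : Int) (ivs : List (List Int)) (part : List Int),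
      -1 ≤ p - 1 → p - 1 < n →
      PySem.List.pyGetD part (-1) (0 : Int) ≠ 1 →
      (pvWhileA (PySem.List.pyRange 1 (n + 1) 1) n m f ivs part p).map pvHeadStr
        = pvLoopB n (PySem.Int.mod (m - 1) n) f ((p - 1) % n) (ivs.map pvHeadStr) := by
  intro f
  induction f with
  | zero => intro p ivs part _ _ _; rfl
  | succ f ih =>
    intro p ivs part hp hp2 hcond
    rw [pvWhileA, if_pos hcond]
    rw [pv_interval_shape n m hn hm p hp hp2]
    set part' := (List.range m.toNat).map (fun (i : Nat) => (p - 1 + (i : Int)) % n + 1) with hpart'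
    have hmnat : (1 : Nat) ≤ m.toNat := by omega
    obtain ⟨j, hj⟩ : ∃ j : Nat, m.toNat = j + 1 := ⟨m.toNat - 1, by omega⟩
    have hjm : ((j : Int)) = m - 1 := by
      have : ((j + 1 : Nat) : Int) = m := by rw [← hj]; omega
      push_cast at this; omega
    -- head of part'
    have hhead : PySem.List.pyGetD part' 0 (0 : Int) = (p - 1) % n + 1 := by
      rw [hpart', hj, List.range_succ_eq_map, List.map_cons, PySem.List.pyGetD_zero_cons]
      simp
    -- last of part'
    have hlast : PySem.List.pyGetD part' (-1) (0 : Int) = (p - 1 + (m - 1)) % n + 1 := by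
      rw [hpart', hj, List.range_succ, List.map_append, List.map_cons, List.map_nil,
        PySem.List.pyGetD_neg_one_append_singleton, hjm]
    -- B's test value equals A's (last element - 1)
    have hstepv : PySem.Int.mod ((p - 1) % n + PySem.Int.mod (m - 1) n) n
        = (p - 1 + (m - 1)) % n := by
      rw [PySem.Int.mod_eq_emod_of_pos (by omega), PySem.Int.mod_eq_emod_of_pos (by omega)]
      rw [Int.emod_add_emod, Int.add_emod_emod]
    rw [pvLoopB, hstepv]
    set L := (p - 1 + (m - 1)) % n with hL
    have hL0 : 0 ≤ L := Int.emod_nonneg _ (by omega)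
    have hLn : L < n := Int.emod_lt_of_pos _ (by omega)
    have hmapapp : (ivs ++ [part']).map pvHeadStr
        = ivs.map pvHeadStr ++ [PySem.Int.toStr ((p - 1) % n + 1)] := by
      rw [List.map_append, List.map_cons, List.map_nil, pvHeadStr, hhead]
    by_cases hstop : L = 0
    · rw [if_pos hstop]
      -- A's next iteration sees part'[-1] = 1 and stops (or fuel is exhausted): result is ivs ++ [part']
      have hA : pvWhileA (PySem.List.pyRange 1 (n + 1) 1) n m f (ivs ++ [part']) part'
          ((p - 1 + m) % n) = ivs ++ [part'] := by
        cases f with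
        | zero => rfl
        | succ f' =>
          rw [pvWhileA, if_neg (by rw [hlast, hstop]; simp)]
      rw [hA, hmapapp]
    · rw [if_neg hstop]
      have hq : -1 ≤ (p - 1 + m) % n - 1 := by
        have := Int.emod_nonneg (p - 1 + m) (show n ≠ 0 by omega); omega
      have hq2 : (p - 1 + m) % n - 1 < n := by
        have := Int.emod_lt_of_pos (p - 1 + m) (show 0 < n by omega); omega
      have hcond' : PySem.List.pyGetD part' (-1) (0 : Int) ≠ 1 := by
        rw [hlast]; omega
      rw [ih ((p - 1 + m) % n) (ivs ++ [part']) part' hq hq2 hcond']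
      have harg : ((p - 1 + m) % n - 1) % n = L := by
        have h1 : ((p - 1 + m) % n + (-1)) % n = (p - 1 + m + (-1)) % n :=
          Int.emod_add_emod (p - 1 + m) n (-1)
        have h2 : (p - 1 + m + (-1) : Int) = p - 1 + (m - 1) := by ring
        rw [h2] at h1
        rw [show (p - 1 + m) % n - 1 = (p - 1 + m) % n + (-1) by ring, h1, hL]
      rw [harg, hmapapp]
  
-- Chars.join with the empty separator is flatten
lemma pv_chars_join_nil_sep : ∀ (l : List (List Char)), PySem.Chars.join [] l = l.flatten
  | [] => PySem.Chars.join_nil []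
  | [x] => by rw [PySem.Chars.join_singleton]; simp
  | x :: y :: t => by
      rw [PySem.Chars.join_cons_cons, pv_chars_join_nil_sep (y :: t)]; simp

-- concatenating strings with foldl is joining with the empty separator
lemma pv_foldl_concat_eq_join (g : List Int → String) :
    ∀ (l : List (List Int)) (acc : String),
      l.foldl (fun r iv => r ++ g iv) acc = acc ++ PySem.Str.join "" (l.map g) := by
  intro l
  induction l with
  | nil =>
    intro acc
    apply String.toList_injective
    simp [PySem.Str.join]
  | cons x t ih =>
    intro acc
    rw [List.foldl_cons, ih]
    apply String.toList_injective
    simp [PySem.Str.join, pv_chars_join_nil_sep]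

-- ===== VERDICT (by name: the statement is the Claim_ definition above) =====
theorem circular_array_spec : Claim_equal_circular_array := by
  intro n m _ hpre
  obtain ⟨hn, hm⟩ := hpre
  show circular_array n m = circular_array_alt n m
  have h := pv_while_eq_loop n m hn hm (n.toNat + 1) 1 [] [0]
    (by omega) (by omega) (by decide)
  simp only [List.map_nil] at h
  rw [show ((1 : Int) - 1) % n = 0 by simp] at h
  simp only [circular_array, circular_array_alt]
  rw [pv_foldl_concat_eq_join]
  unfold pvHeadStr at h
  rw [show n.natAbs + 1 = n.toNat + 1 by omega, h]
  apply String.toList_injective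
  simp
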